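-- pv_equiv track=rewrite | github.com/edmundcheng221/CSCI-003 | Homework 7/animal_functions.py | get_least_urgent
-- ===== SOURCE A (Python) =====
-- def get_least_urgent(animals):  # I only wrote this function because it would help me for the pawsome_pet_vet hw problem
--     urgent = []
--     urgency = 100
--     for i in animals:
--         if i[2] <= urgency:
--             urgency = i[2]
--             urgent.append(i)
--         else:
--             continue
--     return urgent[-1]
-- ===== SOURCE B (Python) =====
-- def get_least_urgent(animals):
--     m = min(a[2] for a in animals)
--     return [a for a in animals if a[2] == m][-1]
-- ===== Notes on version B (the rewrite author's own statement) =====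
-- stated objective: simpler
-- what changed: Replaces the running-minimum loop with mutable state by a compute-then-select decomposition (take the minimum urgency, then return the last animal with that urgency); Pre_ excludes exactly the inputs on which A raises IndexError (empty list or every urgency above A's initial 100 threshold).
import Mathlib
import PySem

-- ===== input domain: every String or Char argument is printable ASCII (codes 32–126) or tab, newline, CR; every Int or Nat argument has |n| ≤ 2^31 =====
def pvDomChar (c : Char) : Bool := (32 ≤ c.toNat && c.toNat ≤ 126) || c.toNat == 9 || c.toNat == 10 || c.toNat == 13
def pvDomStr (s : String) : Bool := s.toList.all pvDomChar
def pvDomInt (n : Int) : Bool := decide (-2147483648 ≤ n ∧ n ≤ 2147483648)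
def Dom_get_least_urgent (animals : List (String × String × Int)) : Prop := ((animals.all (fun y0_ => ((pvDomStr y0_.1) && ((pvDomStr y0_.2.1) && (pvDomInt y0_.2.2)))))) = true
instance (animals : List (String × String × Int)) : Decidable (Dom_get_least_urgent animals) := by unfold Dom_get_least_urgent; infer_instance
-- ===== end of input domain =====

-- B is a compute-then-select decomposition (objective: simpler): take the minimum
-- urgency, then return the last animal with that urgency. Equivalence is on the
-- return value, on the inputs where A returns (Pre_).

-- ===== PORT A =====
-- the for-loop with mutable (urgent, urgency) state, then urgent[-1]
def get_least_urgent (animals : List (String × String × Int)) : String × String × Int :=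
  (PySem.List.pyGet?
    (animals.foldl
      (fun (st : List (String × String × Int) × Int) i =>
        if i.2.2 ≤ st.2 then (st.1 ++ [i], i.2.2) else st)
      ([], 100)).1
    (-1)).getD ("", "", 0)  -- urgent[-1]; Pre_ guarantees it is in range (Python raises IndexError otherwise)

-- ===== PORT B =====
-- m = min(a[2] for a in animals); last animal with urgency m
def get_least_urgent_alt (animals : List (String × String × Int)) : String × String × Int :=
  (PySem.List.pyGet?
    (animals.filter (fun a => a.2.2 ==
      (PySem.List.min? (animals.map (fun a => a.2.2)) (fun x => x)).getD 0))
    (-1)).getD ("", "", 0)  -- result[-1]; Pre_ guarantees it is in range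

-- ===== PRECONDITION & SPEC =====
-- Pre_ excludes exactly the inputs on which A raises IndexError: no animal with urgency ≤ 100
def Pre_get_least_urgent (animals : List (String × String × Int)) : Prop :=
  ∃ a ∈ animals, a.2.2 ≤ 100
instance (animals : List (String × String × Int)) : Decidable (Pre_get_least_urgent animals) := by unfold Pre_get_least_urgent; infer_instance
def pvWitness_get_least_urgent : (List (String × String × Int)) := [("rex", "dog", 5)]
def Spec_get_least_urgent (animals : List (String × String × Int)) (out : String × String × Int) : Prop := out = get_least_urgent_alt animals
instance (animals : List (String × String × Int)) (out : String × String × Int) : Decidable (Spec_get_least_urgent animals out) := by unfold Spec_get_least_urgent; infer_instance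

-- ===== CLAIM (what is proved, stated in full; the proofs are below) =====
def Claim_equal_get_least_urgent : Prop := ∀ (animals : List (String × String × Int)), Dom_get_least_urgent animals → Pre_get_least_urgent animals → Spec_get_least_urgent animals (get_least_urgent animals)

-- ===== LEMMAS AND PROOFS =====

-- abbreviations used only by the proofs
def pvStep (st : List (String × String × Int) × Int) (i : String × String × Int) :
    List (String × String × Int) × Int :=
  if i.2.2 ≤ st.2 then (st.1 ++ [i], i.2.2) else st

def pvM (l : List (String × String × Int)) (c : Int) : Int :=
  l.foldl (fun acc i => min acc i.2.2) c

theorem pvM_cons (i : String × String × Int) (t : List (String × String × Int)) (c : Int) :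
    pvM (i :: t) c = pvM t (min c i.2.2) := rfl

theorem pvM_le (l : List (String × String × Int)) (c : Int) : pvM l c ≤ c := by
  induction l generalizing c with
  | nil => simp [pvM]
  | cons i t ih =>
    calc pvM (i :: t) c = pvM t (min c i.2.2) := rfl
      _ ≤ min c i.2.2 := ih _
      _ ≤ c := min_le_left _ _

theorem pvM_none (l : List (String × String × Int)) (c : Int)
    (h : ∀ a ∈ l, ¬ a.2.2 ≤ c) : pvM l c = c := by
  induction l generalizing c with
  | nil => rfl
  | cons i t ih =>
    have hi : ¬ i.2.2 ≤ c := h i (List.mem_cons_self)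
    have : min c i.2.2 = c := min_eq_left (by omega)
    rw [pvM_cons, this]
    exact ih c (fun a ha => h a (List.mem_cons_of_mem _ ha))

theorem pvM_attain (l : List (String × String × Int)) (c : Int)
    (h : ∃ a ∈ l, a.2.2 ≤ c) : ∃ a ∈ l, a.2.2 = pvM l c := by
  induction l generalizing c with
  | nil => rcases h with ⟨a, ha, _⟩; cases ha
  | cons i t ih =>
    by_cases ht : ∃ a ∈ t, a.2.2 ≤ min c i.2.2
    · rcases ih (min c i.2.2) ht with ⟨a, ha, hv⟩
      exact ⟨a, List.mem_cons_of_mem _ ha, by rw [pvM_cons]; exact hv⟩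
    · push Not at ht
      by_cases hi : i.2.2 ≤ c
      · refine ⟨i, List.mem_cons_self, ?_⟩
        rw [pvM_cons, min_eq_right hi, pvM_none t i.2.2 (fun a ha => ?_)]
        have := ht a ha
        omega
      · exfalso
        rcases h with ⟨a, ha, hv⟩
        rcases List.mem_cons.mp ha with rfl | ha'
        · exact hi hv
        · have := ht a ha'
          omega

theorem pvLoop_none (l : List (String × String × Int)) (u : List (String × String × Int)) (c : Int)
    (h : ∀ a ∈ l, ¬ a.2.2 ≤ c) : l.foldl pvStep (u, c) = (u, c) := by
  induction l with
  | nil => rfl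
  | cons i t ih =>
    have hi : ¬ i.2.2 ≤ c := h i (List.mem_cons_self)
    rw [List.foldl_cons]
    have : pvStep (u, c) i = (u, c) := by simp [pvStep, hi]
    rw [this]
    exact ih (fun a ha => h a (List.mem_cons_of_mem _ ha))

theorem getLast?_cons_of_ne_nil {α : Type} (x : α) (l : List α) (h : l ≠ []) :
    (x :: l).getLast? = l.getLast? := by
  cases l with
  | nil => exact absurd rfl h
  | cons y t => simp [List.getLast?_cons_cons]

-- main invariant: the last element appended by A's loop is the last element whose
-- urgency equals the running minimum, provided some element qualifies
theorem pvLoop_last (l : List (String × String × Int)) (c : Int)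
    (u : List (String × String × Int)) (h : ∃ a ∈ l, a.2.2 ≤ c) :
    (l.foldl pvStep (u, c)).1.getLast? =
      (l.filter (fun a => a.2.2 == pvM l c)).getLast? := by
  induction l generalizing c u with
  | nil => rcases h with ⟨a, ha, _⟩; cases ha
  | cons i t ih =>
    rw [List.foldl_cons]
    by_cases hi : i.2.2 ≤ c
    · have hstep : pvStep (u, c) i = (u ++ [i], i.2.2) := by simp [pvStep, hi]
      have hM : pvM (i :: t) c = pvM t i.2.2 := by
        rw [pvM_cons, min_eq_right hi]
      rw [hstep, hM]
      by_cases ht : ∃ a ∈ t, a.2.2 ≤ i.2.2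
      · rw [ih i.2.2 (u ++ [i]) ht]
        by_cases hiM : i.2.2 = pvM t i.2.2
        · have hfil : (i :: t).filter (fun a => a.2.2 == pvM t i.2.2) =
              i :: t.filter (fun a => a.2.2 == pvM t i.2.2) := by
            rw [List.filter_cons, if_pos (beq_iff_eq.mpr hiM)]
          rw [hfil]
          rcases pvM_attain t i.2.2 ht with ⟨a, ha, hv⟩
          have hne : t.filter (fun a => a.2.2 == pvM t i.2.2) ≠ [] := by
            intro hnil
            have : a ∈ t.filter (fun a => a.2.2 == pvM t i.2.2) :=
              List.mem_filter.mpr ⟨ha, by simp [hv]⟩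
            rw [hnil] at this
            cases this
          rw [getLast?_cons_of_ne_nil _ _ hne]
        · have hfil : (i :: t).filter (fun a => a.2.2 == pvM t i.2.2) =
              t.filter (fun a => a.2.2 == pvM t i.2.2) := by
            rw [List.filter_cons, if_neg (fun h => hiM (beq_iff_eq.mp h))]
          rw [hfil]
      · push Not at ht
        rw [pvLoop_none t (u ++ [i]) i.2.2 (fun a ha => by have := ht a ha; omega)]
        have hMt : pvM t i.2.2 = i.2.2 := pvM_none t i.2.2 (fun a ha => by have := ht a ha; omega)
        have hfil : (i :: t).filter (fun a => a.2.2 == pvM t i.2.2) = [i] := by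
          rw [hMt]
          simp only [List.filter_cons, beq_self_eq_true, if_pos]
          have : t.filter (fun a => a.2.2 == i.2.2) = [] := by
            rw [List.filter_eq_nil_iff]
            intro a ha
            have := ht a ha
            simp only [beq_iff_eq]
            omega
          simp [this]
        rw [hfil]
        simp
    · have hstep : pvStep (u, c) i = (u, c) := by simp [pvStep, hi]
      have hM : pvM (i :: t) c = pvM t c := by
        rw [pvM_cons, min_eq_left (by omega)]
      have ht : ∃ a ∈ t, a.2.2 ≤ c := by
        rcases h with ⟨a, ha, hv⟩
        rcases List.mem_cons.mp ha with rfl | ha'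
        · exact absurd hv hi
        · exact ⟨a, ha', hv⟩
      rw [hstep, hM, ih c u ht]
      have hfil : (i :: t).filter (fun a => a.2.2 == pvM t c) =
          t.filter (fun a => a.2.2 == pvM t c) := by
        have : ¬ i.2.2 = pvM t c := by
          have := pvM_le t c
          omega
        simp [this]
      rw [hfil]

-- foldl min pulls the initial min out
theorem foldl_min_init (t : List Int) (a b : Int) :
    t.foldl min (min a b) = min a (t.foldl min b) := by
  induction t generalizing b with
  | nil => rfl
  | cons c t ih =>
    rw [List.foldl_cons, List.foldl_cons, min_assoc, ih]

theorem foldl_min_le_init (t : List Int) (c : Int) : t.foldl min c ≤ c := by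
  induction t generalizing c with
  | nil => simp
  | cons y s ih =>
    rw [List.foldl_cons]
    exact (ih (min c y)).trans (min_le_left _ _)

theorem foldl_min_le_mem (t : List Int) (c x : Int) (hx : x ∈ t) :
    t.foldl min c ≤ x := by
  induction t generalizing c with
  | nil => cases hx
  | cons y s ih =>
    rw [List.foldl_cons]
    rcases List.mem_cons.mp hx with rfl | hs
    · exact (foldl_min_le_init s (min c x)).trans (min_le_right _ _)
    · exact ih (min c y) hs

-- B's m (Python min of all urgencies) equals A's running minimum, given some urgency ≤ 100
theorem pvB_min_eq (l : List (String × String × Int)) (h : ∃ a ∈ l, a.2.2 ≤ 100) :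
    (PySem.List.min? (l.map (fun a => a.2.2)) (fun x => x)).getD 0 = pvM l 100 := by
  have hM : pvM l 100 = (l.map (fun a => a.2.2)).foldl min 100 := List.foldl_map.symm
  cases hl : l.map (fun a => a.2.2) with
  | nil =>
    rcases h with ⟨a, ha, _⟩
    have : a.2.2 ∈ l.map (fun a => a.2.2) := List.mem_map_of_mem ha
    rw [hl] at this; cases this
  | cons v vt =>
    rw [PySem.List.min?_id_cons, Option.getD_some, hM, hl, List.foldl_cons]
    have h100 : vt.foldl min v ≤ 100 := by
      rcases h with ⟨a, ha, hv⟩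
      have : a.2.2 ∈ l.map (fun a => a.2.2) := List.mem_map_of_mem ha
      rw [hl] at this
      rcases List.mem_cons.mp this with heq | hmem
      · exact (foldl_min_le_init vt v).trans (heq ▸ hv)
      · exact (foldl_min_le_mem vt v a.2.2 hmem).trans hv
    rw [foldl_min_init vt 100 v, min_eq_right h100]

-- ===== VERDICT (by name: the statement is the Claim_ definition above) =====
theorem get_least_urgent_spec : Claim_equal_get_least_urgent := by
  intro animals _dom hpre
  unfold Spec_get_least_urgent get_least_urgent get_least_urgent_alt
  rw [pvB_min_eq animals hpre]
  have hA : animals.foldl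
      (fun (st : List (String × String × Int) × Int) i =>
        if i.2.2 ≤ st.2 then (st.1 ++ [i], i.2.2) else st) ([], 100) =
      animals.foldl pvStep ([], 100) := rfl
  rw [hA, PySem.List.pyGet?_neg_one, PySem.List.pyGet?_neg_one,
      pvLoop_last animals 100 [] hpre]
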